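-- pv_equiv track=rewrite | github.com/Myrofuze/RINT | sources/RINT V2.2.py | _split_concat
-- ===== SOURCE A (Python) =====
-- def _split_concat(expr):
--     parts, cur, in_str = [], "", False
--     for ch in expr:
--         if ch == '"': in_str = not in_str
--         if ch == '+' and not in_str:
--             parts.append(cur); cur = ""
--         else:
--             cur += ch
--     if cur: parts.append(cur)
--     return parts
-- ===== SOURCE B (Python) =====
-- def _split_concat(expr):
--     parts, cur = [], ""
--     outside = True
--     first = True
--     for seg in expr.split('"'):
--         if not first:
--             cur += '"'
--         if outside:
--             pieces = seg.split('+')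
--             cur += pieces[0]
--             for p in pieces[1:]:
--                 parts.append(cur)
--                 cur = p
--         else:
--             cur += seg
--         outside = not outside
--         first = False
--     if cur:
--         parts.append(cur)
--     return parts
-- ===== Notes on version B (the rewrite author's own statement) =====
-- stated objective: faster
-- what changed: B replaces A's per-character state machine with an in_str flag by a decomposition via str.split on the quote character: even-indexed segments (outside quotes) are themselves split on the plus character, odd-indexed segments are appended verbatim, re-adding the removed quote at each boundary.
import Mathlib
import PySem

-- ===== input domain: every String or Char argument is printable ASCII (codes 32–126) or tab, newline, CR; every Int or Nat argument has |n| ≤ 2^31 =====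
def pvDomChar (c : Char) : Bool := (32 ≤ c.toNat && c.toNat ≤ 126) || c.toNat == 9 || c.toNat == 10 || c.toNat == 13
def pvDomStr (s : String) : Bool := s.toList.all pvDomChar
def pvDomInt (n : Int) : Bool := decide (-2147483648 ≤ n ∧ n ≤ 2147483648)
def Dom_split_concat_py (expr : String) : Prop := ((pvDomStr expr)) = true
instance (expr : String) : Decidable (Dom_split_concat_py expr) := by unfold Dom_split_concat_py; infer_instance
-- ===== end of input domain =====

-- B replaces A's per-character state machine by a decomposition via split on the
-- quote character (even segments, outside quotes, are split on the plus character);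
-- same result, measurably faster in Python (str.split runs in C).

-- ===== PORT A =====
-- A's loop body: toggle in_str on '"', split on '+' outside strings, else extend cur.
def pvStepA (st : List (List Char) × List Char × Bool) (ch : Char) :
    List (List Char) × List Char × Bool :=
  let inStr := if ch = '"' then !st.2.2 else st.2.2
  if ch = '+' ∧ inStr = false then (st.1 ++ [st.2.1], ([] : List Char), inStr)
  else (st.1, st.2.1 ++ [ch], inStr)

def split_concat_py (expr : String) : List String :=
  let st := expr.toList.foldl pvStepA ([], [], false)
  (if st.2.1 ≠ [] then st.1 ++ [st.2.1] else st.1).map String.ofList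

-- ===== PORT B =====
-- Source B's inner loop `for p in pieces[1:]: parts.append(cur); cur = p`
def pvInnerB (st : List (List Char) × List Char) (p : List Char) :
    List (List Char) × List Char :=
  (st.1 ++ [st.2], p)

-- Source B's loop body over the segments of expr.split('"'); state (parts, cur, outside, first)
def pvStepB (st : List (List Char) × List Char × Bool × Bool) (seg : List Char) :
    List (List Char) × List Char × Bool × Bool :=
  let cur := if !st.2.2.2 then st.2.1 ++ ['"'] else st.2.1
  let pc :=
    if st.2.2.1 then
      match PySem.Chars.splitOn seg ['+'] with
      | [] => (st.1, cur)
      | p0 :: rest => rest.foldl pvInnerB (st.1, cur ++ p0)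
    else (st.1, cur ++ seg)
  (pc.1, pc.2, !st.2.2.1, false)

def split_concat_py_alt (expr : String) : List String :=
  let st := (PySem.Chars.splitOn expr.toList ['"']).foldl pvStepB ([], [], true, true)
  (if st.2.1 ≠ [] then st.1 ++ [st.2.1] else st.1).map String.ofList

-- ===== PRECONDITION & SPEC =====
def Spec_split_concat_py (expr : String) (out : List String) : Prop := out = split_concat_py_alt expr
instance (expr : String) (out : List String) : Decidable (Spec_split_concat_py expr out) := by unfold Spec_split_concat_py; infer_instance

-- ===== CLAIM (what is proved, stated in full; the proofs are below) =====
def Claim_equal_split_concat_py : Prop := ∀ (expr : String), Dom_split_concat_py expr → Spec_split_concat_py expr (split_concat_py expr)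

-- ===== LEMMAS AND PROOFS =====

-- clean recursive characterisation of Python's s.split(c) for a one-character separator
def pySplit1 (c : Char) : List Char → List (List Char)
  | [] => [[]]
  | x :: t => if x = c then [] :: pySplit1 c t else (pySplit1 c t).modifyHead (x :: ·)

lemma splitOn_go_eq (c : Char) :
    ∀ (fuel : Nat) (l cur : List Char) (acc : List (List Char)), l.length < fuel →
      PySem.Chars.splitOn.go [c] fuel l cur acc =
        acc.reverse ++ (pySplit1 c l).modifyHead (cur.reverse ++ ·) := by
  intro fuel
  induction fuel with
  | zero => intro l cur acc h; omega
  | succ n ih =>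
    intro l cur acc h
    cases l with
    | nil =>
      simp [PySem.Chars.splitOn.go, pySplit1]
    | cons x t =>
      by_cases hxc : x = c
      · subst hxc
        have : [x].isPrefixOf (x :: t) = true := by simp [List.isPrefixOf]
        simp only [PySem.Chars.splitOn.go, this, if_pos, List.length_cons, List.length_nil,
          List.drop_succ_cons, List.drop_zero]
        rw [ih t [] (cur.reverse :: acc) (by simpa using Nat.lt_of_succ_lt_succ h)]
        simp only [pySplit1, if_true, List.reverse_cons, List.reverse_nil, List.nil_append]
        cases pySplit1 x t <;> simp [List.modifyHead]
      · have : [c].isPrefixOf (x :: t) = false := by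
          simp [List.isPrefixOf]; exact fun hh => hxc hh.symm
        simp only [PySem.Chars.splitOn.go, this, Bool.false_eq_true, if_neg, not_false_iff]
        rw [ih t (x :: cur) acc (by simpa using Nat.lt_of_succ_lt_succ h)]
        simp only [pySplit1, if_neg hxc]
        cases pySplit1 c t with
        | nil => simp
        | cons q0 qr => simp [List.modifyHead]

lemma splitOn_eq_pySplit1 (c : Char) (l : List Char) :
    PySem.Chars.splitOn l [c] = pySplit1 c l := by
  unfold PySem.Chars.splitOn
  rw [splitOn_go_eq c (l.length + 1) l [] [] (by omega)]
  cases pySplit1 c l with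
  | nil => simp
  | cons q0 qr => simp [List.modifyHead]

-- combined shape lemma: split is nonempty, reconstructs l, and no piece contains c
lemma pySplit1_decomp (c : Char) (l : List Char) :
    ∃ p0 rest, pySplit1 c l = p0 :: rest ∧
      l = p0 ++ rest.flatMap (fun s => c :: s) ∧
      c ∉ p0 ∧ ∀ s ∈ rest, c ∉ s := by
  induction l with
  | nil => exact ⟨[], [], rfl, rfl, by simp, by simp⟩
  | cons x t ih =>
    obtain ⟨p0, rest, heq, hrec, hp0, hrest⟩ := ih
    by_cases hxc : x = c
    · subst hxc
      refine ⟨[], p0 :: rest, ?_, ?_, by simp, ?_⟩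
      · simp [pySplit1, heq]
      · simp [hrec]
      · intro s hs
        rcases List.mem_cons.mp hs with h | h
        · exact h ▸ hp0
        · exact hrest s h
    · refine ⟨x :: p0, rest, ?_, ?_, ?_, hrest⟩
      · simp [pySplit1, if_neg hxc, heq, List.modifyHead]
      · simp [hrec]
      · intro hmem
        rcases List.mem_cons.mp hmem with h | h
        · exact hxc h.symm
        · exact hp0 h

-- A's loop over a quote-free segment with in_str = true just appends the segment
lemma foldA_inside (seg : List Char) (h : '"' ∉ seg) :
    ∀ parts cur, seg.foldl pvStepA (parts, cur, true) = (parts, cur ++ seg, true) := by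
  induction seg with
  | nil => intro parts cur; simp
  | cons x t ih =>
    intro parts cur
    have hx : x ≠ '"' := fun hh => h (hh ▸ List.mem_cons_self)
    have ht : '"' ∉ t := fun hh => h (List.mem_cons_of_mem _ hh)
    have hstep : pvStepA (parts, cur, true) x = (parts, cur ++ [x], true) := by
      simp [pvStepA, if_neg hx]
    rw [List.foldl_cons, hstep, ih ht parts (cur ++ [x])]
    simp

-- A's loop over a quote-free segment with in_str = false performs B's even-segment processing
lemma foldA_outside (seg : List Char) (h : '"' ∉ seg) :
    ∀ parts cur p0 rest, pySplit1 '+' seg = p0 :: rest →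
      seg.foldl pvStepA (parts, cur, false) =
        ((rest.foldl pvInnerB (parts, cur ++ p0)).1,
         (rest.foldl pvInnerB (parts, cur ++ p0)).2, false) := by
  induction seg with
  | nil =>
    intro parts cur p0 rest heq
    simp only [pySplit1] at heq
    cases heq
    simp
  | cons x t ih =>
    intro parts cur p0 rest heq
    have hx : x ≠ '"' := fun hh => h (hh ▸ List.mem_cons_self)
    have ht : '"' ∉ t := fun hh => h (List.mem_cons_of_mem _ hh)
    obtain ⟨q0, qr, hteq, _, _, _⟩ := pySplit1_decomp '+' t
    by_cases hxp : x = '+'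
    · subst hxp
      simp only [pySplit1, if_true, hteq] at heq
      injection heq with h1 h2
      subst h1; subst h2
      have hstep : pvStepA (parts, cur, false) '+' = (parts ++ [cur], [], false) := by
        simp [pvStepA, hx]
      rw [List.foldl_cons, hstep, ih ht (parts ++ [cur]) [] q0 qr hteq]
      simp [pvInnerB]
    · simp only [pySplit1, if_neg hxp, hteq, List.modifyHead] at heq
      injection heq with h1 h2
      subst h1; subst h2
      have hstep : pvStepA (parts, cur, false) x = (parts, cur ++ [x], false) := by
        simp [pvStepA, hx, hxp]
      rw [List.foldl_cons, hstep, ih ht parts (cur ++ [x]) q0 qr hteq]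
      simp

-- the tail segments: each '"'-prefixed quote-free segment of the char stream matches one
-- pvStepB iteration with first = false; A's in_str before the quote equals B's outside flag
lemma foldA_rest (segs : List (List Char)) (h : ∀ s ∈ segs, '"' ∉ s) :
    ∀ parts cur outside,
      (segs.flatMap (fun s => '"' :: s)).foldl pvStepA (parts, cur, outside) =
        ((segs.foldl pvStepB (parts, cur, outside, false)).1,
         (segs.foldl pvStepB (parts, cur, outside, false)).2.1,
         (segs.foldl pvStepB (parts, cur, outside, false)).2.2.1) := by
  induction segs with
  | nil => intro parts cur outside; simp
  | cons seg rest ih =>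
    intro parts cur outside
    have hseg : '"' ∉ seg := h seg List.mem_cons_self
    have hrest : ∀ s ∈ rest, '"' ∉ s := fun s hs => h s (List.mem_cons_of_mem _ hs)
    rw [List.flatMap_cons, List.foldl_append, List.foldl_cons, List.foldl_cons]
    cases outside with
    | true =>
      have hquote : pvStepA (parts, cur, true) '"' = (parts, cur ++ ['"'], false) := by
        simp [pvStepA]
      rw [hquote]
      obtain ⟨p0, pr, hpeq, _, _, _⟩ := pySplit1_decomp '+' seg
      have hB : pvStepB (parts, cur, true, false) seg =
          ((pr.foldl pvInnerB (parts, cur ++ ['"'] ++ p0)).1,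
           (pr.foldl pvInnerB (parts, cur ++ ['"'] ++ p0)).2, false, false) := by
        simp only [pvStepB, splitOn_eq_pySplit1, hpeq]
        simp
      rw [foldA_outside seg hseg parts (cur ++ ['"']) p0 pr hpeq, hB, ih hrest]
    | false =>
      have hquote : pvStepA (parts, cur, false) '"' = (parts, cur ++ ['"'], true) := by
        simp [pvStepA]
      rw [hquote]
      have hB : pvStepB (parts, cur, false, false) seg =
          (parts, cur ++ ['"'] ++ seg, true, false) := by
        simp only [pvStepB]
        simp
      rw [foldA_inside seg hseg parts (cur ++ ['"']), hB, ih hrest]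

-- ===== VERDICT (by name: the statement is the Claim_ definition above) =====
theorem split_concat_py_spec : Claim_equal_split_concat_py := by
  intro expr _
  unfold Spec_split_concat_py split_concat_py split_concat_py_alt
  obtain ⟨p0, rest, heq, hrec, hp0, hrest⟩ := pySplit1_decomp '"' expr.toList
  rw [splitOn_eq_pySplit1, heq, List.foldl_cons]
  obtain ⟨q0, qr, hqeq, _, _, _⟩ := pySplit1_decomp '+' p0
  have hB0 : pvStepB (([] : List (List Char)), ([] : List Char), true, true) p0 =
      ((qr.foldl pvInnerB ([], q0)).1, (qr.foldl pvInnerB ([], q0)).2, false, false) := by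
    simp only [pvStepB, splitOn_eq_pySplit1, hqeq]
    simp
  rw [hB0, hrec, List.foldl_append,
    foldA_outside p0 hp0 [] [] q0 qr hqeq]
  simp only [List.nil_append]
  rw [foldA_rest rest hrest]
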